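-- pv_equiv track=rewrite | github.com/VITAMIN-organisation/vitamin-model-checker | model_checker/benchmarking/generators.py | generate_natatl_linear_chain_model
-- ===== SOURCE A (Python) =====
-- NL = "\n"
--
-- def _state_names(num_states):
--     return [f"s{i}" for i in range(num_states)]
--
-- def _unknown_transitions_grid(num_states):
--     row = " ".join(["0"] * num_states)
--     return [row] * num_states
--
-- def _format_cgs_body(
--     transitions,
--     unknown_transitions,
--     states,
--     atomic_propositions,
--     labelling,
--     num_agents,
--     costs_for_actions=None,
--     extra_after_labelling=None,
-- ):
--     parts = [
--         "Transition",
--         NL.join(transitions),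
--         "Unknown_Transition_by",
--         NL.join(unknown_transitions),
--         "Name_State",
--         " ".join(states),
--         "Initial_State",
--         "s0",
--     ]
--     if costs_for_actions is not None:
--         parts.append("Costs_for_actions")
--         parts.append(costs_for_actions)
--     parts.extend(
--         [
--             "Atomic_propositions",
--             atomic_propositions,
--             "Labelling",
--             NL.join(labelling),
--         ]
--     )
--     if extra_after_labelling:
--         parts.append(extra_after_labelling)
--     parts.extend(["Number_of_agents", str(num_agents)])
--     return NL.join(parts) + NL
--
-- def _labelling_p_first_last(num_states, prop_names):
--     rows = []
--     for i in range(num_states):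
--         row = []
--         for prop in prop_names:
--             if prop == "p":
--                 row.append("1" if (i == 0 or i == num_states - 1) else "0")
--             else:
--                 row.append("0")
--         rows.append(" ".join(row))
--     return rows
--
-- def generate_natatl_linear_chain_model(num_states, num_agents=2, prop_names=None):
--     if prop_names is None:
--         prop_names = ["p"]
--
--     states = _state_names(num_states)
--     transitions = []
--     unknown_transitions = _unknown_transitions_grid(num_states)
--
--     for i in range(num_states):
--         row = []
--         for j in range(num_states):
--             if j == i:
--                 idle_action = "I" * num_agents if num_agents > 1 else "I"
--                 row.append(idle_action)
--             elif j == i + 1: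
--                 action = "C" * num_agents if num_agents > 1 else "C"
--                 row.append(action)
--             else:
--                 row.append("0")
--         transitions.append(" ".join(row))
--
--     labelling = _labelling_p_first_last(num_states, prop_names)
--     return _format_cgs_body(
--         transitions,
--         unknown_transitions,
--         states,
--         " ".join(prop_names),
--         labelling,
--         num_agents,
--     )
-- ===== SOURCE B (Python) =====
-- def generate_natatl_linear_chain_model(num_states, num_agents=2, prop_names=None):
--     if prop_names is None:
--         prop_names = ["p"]
--     n = num_states
--
--     # Shift-register construction of the transition matrix: row 0 is
--     # [idle, act, 0, ..., 0]; every later row is the previous row shifted one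
--     # cell to the right (push a "0" in front, drop the last cell).  No per-cell
--     # index comparisons are ever made.
--     transitions = []
--     if n > 0:
--         idle = "I" * num_agents if num_agents > 1 else "I"
--         act = "C" * num_agents if num_agents > 1 else "C"
--         row = [idle, act][:n] + ["0"] * (n - 2)
--         for _ in range(n):
--             transitions.append(" ".join(row))
--             row = ["0"] + row[:-1]
--
--     # Labelling in closed form by multiplicities: 'p' holds exactly at the
--     # first and last state, so the grid is p_row, (n-2) zero rows, p_row.
--     p_row = " ".join("1" if prop == "p" else "0" for prop in prop_names)
--     z_row = " ".join("0" for _ in prop_names)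
--     if n <= 0:
--         labelling = []
--     elif n == 1:
--         labelling = [p_row]
--     else:
--         labelling = [p_row] + [z_row] * (n - 2) + [p_row]
--
--     zero_row = " ".join(["0"] * n)
--     parts = [
--         "Transition",
--         "\n".join(transitions),
--         "Unknown_Transition_by",
--         "\n".join([zero_row] * n),
--         "Name_State",
--         " ".join("s%d" % i for i in range(n)),
--         "Initial_State",
--         "s0",
--         "Atomic_propositions",
--         " ".join(prop_names),
--         "Labelling",
--         "\n".join(labelling),
--         "Number_of_agents",
--         str(num_agents),
--     ]
--     return "\n".join(parts) + "\n"
-- ===== Notes on version B (the rewrite author's own statement) =====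
-- stated objective: alternative
-- what changed: B builds the transition matrix as a shift register - row 0 is [idle, act, 0...] and each later row is the previous row with a '0' pushed in front and the last cell dropped - and builds the labelling grid in closed form as p_row, (n-2) copies of the zero row, p_row, so no per-cell index comparison or per-state scan of prop_names remains.
import Mathlib
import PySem

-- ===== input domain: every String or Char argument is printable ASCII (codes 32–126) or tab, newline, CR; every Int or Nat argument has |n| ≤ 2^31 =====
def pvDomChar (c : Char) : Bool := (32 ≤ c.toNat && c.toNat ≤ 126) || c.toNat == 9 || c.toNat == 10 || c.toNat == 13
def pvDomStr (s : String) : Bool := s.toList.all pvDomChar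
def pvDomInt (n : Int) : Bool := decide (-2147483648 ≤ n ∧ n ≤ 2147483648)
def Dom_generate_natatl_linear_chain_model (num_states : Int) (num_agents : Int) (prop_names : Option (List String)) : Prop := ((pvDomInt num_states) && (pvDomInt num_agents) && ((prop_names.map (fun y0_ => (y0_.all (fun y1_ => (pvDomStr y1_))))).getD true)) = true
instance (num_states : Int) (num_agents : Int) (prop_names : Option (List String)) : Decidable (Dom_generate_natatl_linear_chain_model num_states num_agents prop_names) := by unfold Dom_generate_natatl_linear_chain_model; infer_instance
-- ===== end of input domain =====

-- B builds the transition matrix as a shift register (row 0 = [idle, act, 0…];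
-- each later row = "0" pushed in front of the previous row with its last cell
-- dropped) and the labelling grid in closed form (p_row, (n-2) zero rows, p_row)
-- instead of A's per-cell branching loops; objective: alternative. Both are pure.

-- ===== PORT A =====
-- port of _format_cgs_body (called here with costs_for_actions=None, extra_after_labelling=None;
-- the optional parameters are kept; Python's truthiness test on extra_after_labelling is '≠ ""')
def pvFormatCgsBody (transitions unknown_transitions states : List String)
    (atomic_propositions : String) (labelling : List String) (num_agents : Int)
    (costs_for_actions : Option String) (extra_after_labelling : Option String) : String :=
  let parts := ["Transition", PySem.Str.join "\n" transitions,
    "Unknown_Transition_by", PySem.Str.join "\n" unknown_transitions,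
    "Name_State", PySem.Str.join " " states, "Initial_State", "s0"]
  let parts := match costs_for_actions with
    | some c => parts ++ ["Costs_for_actions", c]
    | none => parts
  let parts := parts ++ ["Atomic_propositions", atomic_propositions,
    "Labelling", PySem.Str.join "\n" labelling]
  let parts := match extra_after_labelling with
    | some e => if e = "" then parts else parts ++ [e]
    | none => parts
  let parts := parts ++ ["Number_of_agents", PySem.Int.toStr num_agents]
  PySem.Str.join "\n" parts ++ "\n"

def generate_natatl_linear_chain_model (num_states : Int) (num_agents : Int) (prop_names : Option (List String)) : String :=
  let props := prop_names.getD ["p"]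
  -- _state_names: [f"s{i}" for i in range(num_states)]
  let states := (PySem.List.pyRange 0 num_states).map (fun i => "s" ++ PySem.Int.toStr i)
  -- _unknown_transitions_grid
  let unknown := PySem.List.pyRepeat
      [PySem.Str.join " " (PySem.List.pyRepeat ["0"] num_states)] num_states
  let transitions := (PySem.List.pyRange 0 num_states).foldl (fun acc i =>
      let row := (PySem.List.pyRange 0 num_states).foldl (fun r j =>
        if j = i then
          r ++ [if num_agents > 1 then String.ofList (PySem.List.pyRepeat ['I'] num_agents) else "I"]
        else if j = i + 1 then
          r ++ [if num_agents > 1 then String.ofList (PySem.List.pyRepeat ['C'] num_agents) else "C"]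
        else r ++ ["0"]) []
      acc ++ [PySem.Str.join " " row]) []
  -- _labelling_p_first_last
  let labelling := (PySem.List.pyRange 0 num_states).foldl (fun rows i =>
      let row := props.foldl (fun r prop =>
        if prop = "p" then
          r ++ [if i = 0 ∨ i = num_states - 1 then "1" else "0"]
        else r ++ ["0"]) []
      rows ++ [PySem.Str.join " " row]) []
  pvFormatCgsBody transitions unknown states (PySem.Str.join " " props) labelling num_agents none none

-- ===== PORT B =====
def generate_natatl_linear_chain_model_alt (num_states : Int) (num_agents : Int) (prop_names : Option (List String)) : String :=
  let props := prop_names.getD ["p"]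
  let n := num_states
  -- shift-register loop: '[idle, act][:n]' with n > 0 is 'take n.toNat';
  -- 'row[:-1]' is dropLast (exact, also on []); the loop variable is unused
  let transitions :=
    if n > 0 then
      let idle := if num_agents > 1 then String.ofList (PySem.List.pyRepeat ['I'] num_agents) else "I"
      let act := if num_agents > 1 then String.ofList (PySem.List.pyRepeat ['C'] num_agents) else "C"
      ((PySem.List.pyRange 0 n).foldl
        (fun (st : List String × List String) _ =>
          (st.1 ++ [PySem.Str.join " " st.2], "0" :: st.2.dropLast))
        ([], [idle, act].take n.toNat ++ PySem.List.pyRepeat ["0"] (n - 2))).1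
    else []
  let p_row := PySem.Str.join " " (props.map (fun prop => if prop = "p" then "1" else "0"))
  let z_row := PySem.Str.join " " (props.map (fun _ => "0"))
  let labelling :=
    if n ≤ 0 then []
    else if n = 1 then [p_row]
    else [p_row] ++ PySem.List.pyRepeat [z_row] (n - 2) ++ [p_row]
  let zero_row := PySem.Str.join " " (PySem.List.pyRepeat ["0"] n)
  let parts := ["Transition", PySem.Str.join "\n" transitions,
    "Unknown_Transition_by", PySem.Str.join "\n" (PySem.List.pyRepeat [zero_row] n),
    "Name_State", PySem.Str.join " " ((PySem.List.pyRange 0 n).map (fun i => "s" ++ PySem.Int.toStr i)),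
    "Initial_State", "s0",
    "Atomic_propositions", PySem.Str.join " " props,
    "Labelling", PySem.Str.join "\n" labelling,
    "Number_of_agents", PySem.Int.toStr num_agents]
  PySem.Str.join "\n" parts ++ "\n"

-- ===== PRECONDITION & SPEC =====
def Spec_generate_natatl_linear_chain_model (num_states : Int) (num_agents : Int) (prop_names : Option (List String)) (out : String) : Prop := out = generate_natatl_linear_chain_model_alt num_states num_agents prop_names
instance (num_states : Int) (num_agents : Int) (prop_names : Option (List String)) (out : String) : Decidable (Spec_generate_natatl_linear_chain_model num_states num_agents prop_names out) := by unfold Spec_generate_natatl_linear_chain_model; infer_instance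

-- ===== CLAIM =====
def Claim_equal_generate_natatl_linear_chain_model : Prop := ∀ (num_states : Int) (num_agents : Int) (prop_names : Option (List String)), Dom_generate_natatl_linear_chain_model num_states num_agents prop_names → Spec_generate_natatl_linear_chain_model num_states num_agents prop_names (generate_natatl_linear_chain_model num_states num_agents prop_names)

-- ===== LEMMAS AND PROOFS =====

-- range(0, n) as a map over List.range, for every Int n (empty when n ≤ 0)
lemma pyRange_zero_toNat (n : Int) :
    PySem.List.pyRange 0 n = (List.range n.toNat).map (fun k : Nat => (k : Int)) := by
  by_cases h : 0 ≤ n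
  · obtain ⟨m, rfl⟩ := Int.eq_ofNat_of_zero_le h
    rw [Int.toNat_natCast]
    exact PySem.List.pyRange_zero_natCast m
  · have h1 : n.toNat = 0 := Int.toNat_of_nonpos (by omega)
    have h2 : PySem.List.pyRange 0 n = [] := by
      apply List.eq_nil_iff_forall_not_mem.mpr
      intro x hx
      rcases PySem.List.mem_pyRange_one.mp hx with ⟨h3, h4⟩
      omega
    simp [h1, h2]

-- the transition row with the markers at columns k and k+1, as a function of k
def pvRowAt (m : Nat) (idle act : String) (k : Nat) : List String :=
  (List.range m).map (fun j => if j = k then idle else if j = k + 1 then act else "0")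

lemma pvRowAt_length (m : Nat) (idle act : String) (k : Nat) :
    (pvRowAt m idle act k).length = m := by simp [pvRowAt]

-- one shift-register step moves the markers one column to the right
lemma pvRowAt_shift (m : Nat) (idle act : String) (k : Nat) (hm : 1 ≤ m) :
    "0" :: (pvRowAt m idle act k).dropLast = pvRowAt m idle act (k + 1) := by
  apply List.ext_getElem
  · simp only [List.length_cons, List.length_dropLast, pvRowAt_length]
    omega
  · intro t ht1 ht2
    match t with
    | 0 =>
      simp only [List.getElem_cons_zero, pvRowAt, List.getElem_map, List.getElem_range]
      rw [if_neg (by omega), if_neg (by omega)]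
    | t + 1 =>
      simp only [List.getElem_cons_succ, pvRowAt, List.getElem_dropLast, List.getElem_map,
        List.getElem_range, Nat.add_right_cancel_iff]

-- B's initial row is pvRowAt 0
lemma pvRow0_eq (m : Nat) (idle act : String) (hm : 1 ≤ m) :
    [idle, act].take m ++ List.replicate (m - 2) "0" = pvRowAt m idle act 0 := by
  apply List.ext_getElem
  · simp only [List.length_append, List.length_take, List.length_cons, List.length_nil,
      List.length_replicate, pvRowAt_length]
    omega
  · intro t ht1 ht2
    have htm : t < m := by simpa [pvRowAt] using ht2
    simp only [pvRowAt, List.getElem_map, List.getElem_range]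
    match t with
    | 0 =>
      rw [List.getElem_append_left (by simp; omega)]
      simp [List.getElem_take]
    | 1 =>
      rw [List.getElem_append_left (by simp; omega)]
      simp [List.getElem_take]
    | t + 2 =>
      rw [List.getElem_append_right (by simp), List.getElem_replicate,
        if_neg (by omega), if_neg (by omega)]

-- the shift-register fold produces exactly the rows pvRowAt k, pvRowAt (k+1), …
lemma pvShiftFold (m : Nat) (idle act : String) (hm : 1 ≤ m) :
    ∀ (l : List Int) (acc : List String) (k : Nat),
    l.foldl (fun (st : List String × List String) _ =>
        (st.1 ++ [PySem.Str.join " " st.2], "0" :: st.2.dropLast))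
      (acc, pvRowAt m idle act k)
    = (acc ++ (List.range l.length).map (fun t => PySem.Str.join " " (pvRowAt m idle act (k + t))),
       pvRowAt m idle act (k + l.length)) := by
  intro l
  induction l with
  | nil => intro acc k; simp
  | cons x xs ih =>
    intro acc k
    simp only [List.foldl_cons, pvRowAt_shift m idle act k hm]
    rw [ih (acc ++ [PySem.Str.join " " (pvRowAt m idle act k)]) (k + 1)]
    simp only [Prod.mk.injEq, List.length_cons, List.range_succ_eq_map, List.map_cons,
      List.map_map, List.append_assoc, Nat.add_zero, List.singleton_append]
    refine ⟨?_, by congr 1; omega⟩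
    congr 2
    apply List.map_congr_left
    intro t _
    simp only [Function.comp_apply]
    have harg : k + 1 + t = k + Nat.succ t := by omega
    rw [harg]

-- A's transition loop produces the same rows (as joins of pvRowAt)
lemma transA_eq (n : Int) (idle act : String) :
    (PySem.List.pyRange 0 n).foldl (fun acc i =>
      acc ++ [PySem.Str.join " " ((PySem.List.pyRange 0 n).foldl (fun r j =>
        if j = i then r ++ [idle]
        else if j = i + 1 then r ++ [act]
        else r ++ ["0"]) [])]) []
    = (List.range n.toNat).map (fun k => PySem.Str.join " " (pvRowAt n.toNat idle act k)) := by
  rw [PySem.List.foldl_append_singleton_eq_map, pyRange_zero_toNat, List.map_map]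
  simp only [List.nil_append]
  apply List.map_congr_left
  intro k _
  simp only [Function.comp_apply]
  congr 1
  have hf : (fun (r : List String) (j : Int) =>
      if j = (k : Int) then r ++ [idle]
      else if j = (k : Int) + 1 then r ++ [act]
      else r ++ ["0"])
      = (fun (r : List String) (j : Int) => r ++ [if j = (k : Int) then idle
        else if j = (k : Int) + 1 then act else "0"]) := by
    funext r j; split_ifs <;> rfl
  rw [hf, PySem.List.foldl_append_singleton_eq_map, List.map_map]
  simp only [List.nil_append, pvRowAt]
  apply List.map_congr_left
  intro j _
  simp only [Function.comp_apply]
  by_cases h1 : j = k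
  · rw [if_pos (by exact_mod_cast h1), if_pos h1]
  · rw [if_neg (by exact_mod_cast h1), if_neg h1]
    by_cases h2 : j = k + 1
    · rw [if_pos (by omega), if_pos h2]
    · rw [if_neg (by omega), if_neg h2]

-- A's labelling loop equals B's closed-form grid
lemma labA_eq (n : Int) (props : List String) :
    (PySem.List.pyRange 0 n).foldl (fun rows i =>
      rows ++ [PySem.Str.join " " (props.foldl (fun r prop =>
        if prop = "p" then
          r ++ [if i = 0 ∨ i = n - 1 then "1" else "0"]
        else r ++ ["0"]) [])]) []
    = (if n ≤ 0 then []
       else if n = 1 then [PySem.Str.join " " (props.map (fun prop => if prop = "p" then "1" else "0"))]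
       else [PySem.Str.join " " (props.map (fun prop => if prop = "p" then "1" else "0"))]
            ++ PySem.List.pyRepeat [PySem.Str.join " " (props.map (fun _ => "0"))] (n - 2)
            ++ [PySem.Str.join " " (props.map (fun prop => if prop = "p" then "1" else "0"))]) := by
  rw [PySem.List.foldl_append_singleton_eq_map, pyRange_zero_toNat, List.map_map]
  simp only [List.nil_append]
  have hf : ∀ i : Int, (props.foldl (fun r prop =>
      if prop = "p" then
        r ++ [if i = 0 ∨ i = n - 1 then "1" else "0"]
      else r ++ ["0"]) [])
      = props.map (fun prop => if prop = "p" then (if i = 0 ∨ i = n - 1 then "1" else "0") else "0") := by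
    intro i
    have hg : (fun (r : List String) (prop : String) =>
        if prop = "p" then r ++ [if i = 0 ∨ i = n - 1 then "1" else "0"] else r ++ ["0"])
        = (fun (r : List String) (prop : String) =>
          r ++ [if prop = "p" then (if i = 0 ∨ i = n - 1 then "1" else "0") else "0"]) := by
      funext r prop; split_ifs <;> rfl
    rw [hg, PySem.List.foldl_append_singleton_eq_map, List.nil_append]
  simp only [hf]
  by_cases h0 : n ≤ 0
  · have h0' : n.toNat = 0 := by omega
    rw [h0']
    simp [h0]
  · rw [if_neg h0]
    by_cases h1 : n = 1
    · subst h1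
      norm_num [List.range_succ]
    · rw [if_neg h1, PySem.List.pyRepeat_singleton]
      have hm : 2 ≤ n.toNat := by omega
      apply List.ext_getElem
      · simp
        omega
      · intro t ht1 ht2
        simp only [List.getElem_map, List.getElem_range, Function.comp_apply]
        by_cases he : (t : Int) = 0 ∨ (t : Int) = n - 1
        · rw [if_pos ?side]
          case side => exact he
          rcases he with he | he
          · have h3 : t = 0 := by omega
            subst h3
            rw [List.getElem_append_left (by simp)]
            simp
          · have hlast : t = n.toNat - 1 := by simp at ht1; omega
            rw [List.getElem_append_right (by simp; omega)]
            simp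
        · have he' : ¬((t : Int) = 0 ∨ (t : Int) = n - 1) := he
          simp only [if_neg he']
          have ht0 : 1 ≤ t := by omega
          have htl : t < n.toNat - 1 := by simp at ht1; omega
          rw [List.getElem_append_left (by simp; omega)]
          match t, ht0 with
          | t + 1, _ =>
            rw [List.getElem_append_right (by simp), List.getElem_replicate]
            simp

-- ===== VERDICT =====
theorem generate_natatl_linear_chain_model_spec : Claim_equal_generate_natatl_linear_chain_model := by
  intro num_states num_agents prop_names _
  unfold Spec_generate_natatl_linear_chain_model
  simp only [generate_natatl_linear_chain_model, generate_natatl_linear_chain_model_alt,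
    pvFormatCgsBody]
  rw [transA_eq, labA_eq]
  by_cases hn : num_states > 0
  · rw [if_pos hn]
    have hm : 1 ≤ num_states.toNat := by omega
    have h2 : PySem.List.pyRepeat ["0"] (num_states - 2) = List.replicate (num_states.toNat - 2) "0" := by
      rw [PySem.List.pyRepeat_singleton]
      congr 1
      omega
    rw [h2, pvRow0_eq num_states.toNat _ _ hm, pvShiftFold num_states.toNat _ _ hm]
    have hlen : (PySem.List.pyRange 0 num_states).length = num_states.toNat := by
      rw [pyRange_zero_toNat]
      simp
    rw [hlen]
    simp
  · rw [if_neg hn]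
    have h0 : num_states.toNat = 0 := by omega
    rw [h0]
    simp
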